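-- pv_equiv track=rewrite | github.com/yanshg/daily_coding_problems | solutions/351_ambiguous_words.py | helper
-- ===== SOURCE A (Python) =====
-- def helper(words,word_meanings):
--     if not words:
--         return [[]]
--
--     l=len(words)
--     mid=l//2
--     mid_word=words[mid]
--     mid_words=word_meanings[mid_word] if mid_word and mid_word in word_meanings else [mid_word]
--
--     if l==1:
--         return [ [word] for word in mid_words ]
--
--     results=[]
--
--     for left_s in helper(words[:mid],word_meanings):
--         for mid_s in mid_words:
--             for right_s in helper(words[mid+1:],word_meanings):
--                 results+=[left_s + [mid_s] + right_s]
--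
--     return results
-- ===== SOURCE B (Python) =====
-- def helper(words, word_meanings):
--     # One left-to-right pass. Partial results are kept as structure-sharing
--     # chains (m, parent-chain), so extending a result is O(1) instead of
--     # copying the whole prefix; chains are materialized into lists at the end.
--     chains = [None]
--     for word in words:
--         meanings = word_meanings[word] if word and word in word_meanings else [word]
--         chains = [(chain, m) for chain in chains for m in meanings]
--     results = []
--     for chain in chains:
--         combo = []
--         while chain is not None:
--             chain, m = chain
--             combo.append(m)
--         combo.reverse()
--         results.append(combo)
--     return results
-- ===== Notes on version B (the rewrite author's own statement) =====
-- stated objective: alternative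
-- what changed: Replaced the divide-and-conquer recursion, which re-runs the right-half recursion for every (left, mid) combination, with a single left-to-right pass over the words that extends structure-sharing partial chains and materializes them at the end.
import Mathlib
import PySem

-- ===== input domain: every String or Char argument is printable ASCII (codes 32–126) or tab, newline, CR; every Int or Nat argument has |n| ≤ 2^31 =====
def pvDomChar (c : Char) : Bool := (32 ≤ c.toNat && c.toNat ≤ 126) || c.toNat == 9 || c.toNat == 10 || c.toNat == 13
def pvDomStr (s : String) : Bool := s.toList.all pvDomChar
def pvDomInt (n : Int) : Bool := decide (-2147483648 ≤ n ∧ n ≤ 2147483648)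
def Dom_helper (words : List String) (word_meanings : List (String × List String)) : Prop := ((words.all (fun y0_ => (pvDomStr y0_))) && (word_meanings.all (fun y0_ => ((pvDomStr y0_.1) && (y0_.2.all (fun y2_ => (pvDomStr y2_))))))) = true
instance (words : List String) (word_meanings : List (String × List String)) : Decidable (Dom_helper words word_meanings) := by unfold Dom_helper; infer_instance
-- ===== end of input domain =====

-- B changes the divide-and-conquer recursion (which re-runs the right-half recursion for every
-- (left, mid) pair) into one left-to-right pass extending partial results; no recomputation.

-- Shared by both ports: Python's `word_meanings[w] if w and w in word_meanings else [w]`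
-- (the dict argument arrives as an association list; dict construction = PySem.Dict.ofList).
def meaningsOf (word_meanings : List (String × List String)) (w : String) : List String :=
  if w ≠ "" then
    match (PySem.Dict.ofList word_meanings).get? w with
    | some ms => ms
    | none => [w]
  else [w]

-- ===== PORT A =====
-- literal port of A: recursive split at mid = l//2; `words[mid]` is always in range here, so
-- pyGetD's default is never used; the right-half recursive call sits inside the loops exactly
-- where Python evaluates it.
def helper (words : List String) (word_meanings : List (String × List String)) : List (List String) :=
  if words = [] then [[]]
  else
    let l : Int := words.length
    let mid : Int := PySem.Int.floordiv l 2
    let mid_word : String := PySem.List.pyGetD words mid ""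
    let mid_words := meaningsOf word_meanings mid_word
    if l = 1 then mid_words.map (fun word => [word])
    else
      (helper (PySem.List.slice words none (some mid)) word_meanings).foldl
        (fun results left_s =>
          mid_words.foldl
            (fun results mid_s =>
              (helper (PySem.List.slice words (some (mid + 1)) none) word_meanings).foldl
                (fun results right_s => results ++ [left_s ++ [mid_s] ++ right_s]) results)
            results)
        []
termination_by words.length
decreasing_by
  all_goals
    have hl : (1 : Int) ≤ (words.length : Int) := by
      rcases words with _ | _ <;> simp_all
    have h2 : PySem.Int.floordiv (words.length : Int) 2 = (words.length : Int) / 2 :=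
      PySem.Int.floordiv_eq_ediv_of_pos (by omega)
    rw [h2]
    first
      | (rw [PySem.List.slice_from words (by omega)]; simp only [List.length_drop]; omega)
      | (rw [PySem.List.slice_to words (by omega)]; simp only [List.length_take]; omega)

-- ===== PORT B =====
-- a chain (m, parent) materialized by append-then-reverse is the reverse of the cons-list m :: parent
def helper_alt (words : List String) (word_meanings : List (String × List String)) : List (List String) :=
  (words.foldl
    (fun chains word =>
      chains.flatMap (fun chain => (meaningsOf word_meanings word).map (fun m => m :: chain)))
    [[]]).map List.reverse

-- ===== PRECONDITION & SPEC =====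
def Spec_helper (words : List String) (word_meanings : List (String × List String)) (out : List (List String)) : Prop := out = helper_alt words word_meanings
instance (words : List String) (word_meanings : List (String × List String)) (out : List (List String)) : Decidable (Spec_helper words word_meanings out) := by unfold Spec_helper; infer_instance

-- ===== CLAIM (what is proved, stated in full; the proofs are below) =====
def Claim_equal_helper : Prop := ∀ (words : List String) (word_meanings : List (String × List String)), Dom_helper words word_meanings → Spec_helper words word_meanings (helper words word_meanings)

-- ===== LEMMAS AND PROOFS =====

-- the common value: head-major Cartesian product of the meaning lists
def cart (wm : List (String × List String)) : List String → List (List String)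
  | [] => [[]]
  | w :: ws => (meaningsOf wm w).flatMap (fun m => (cart wm ws).map (fun r => m :: r))

theorem cart_append (wm : List (String × List String)) (xs ys : List String) :
    cart wm (xs ++ ys) = (cart wm xs).flatMap (fun a => (cart wm ys).map (fun b => a ++ b)) := by
  induction xs with
  | nil => simp [cart]
  | cons w xs ih =>
      simp only [List.cons_append, cart, ih, List.flatMap_map, List.map_flatMap,
        List.flatMap_assoc]
      simp [Function.comp_def]

theorem alt_aux (wm : List (String × List String)) (ws : List String)
    (acc : List (List String)) :
    ws.foldl (fun chains word =>
        chains.flatMap (fun chain => (meaningsOf wm word).map (fun m => m :: chain))) acc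
      = acc.flatMap (fun r => (cart wm ws).map (fun c => c.reverse ++ r)) := by
  induction ws generalizing acc with
  | nil => simp [cart]
  | cons w ws ih =>
      simp only [List.foldl_cons, ih, cart, List.flatMap_assoc, List.flatMap_map,
        List.map_flatMap, List.map_map, Function.comp_def, List.reverse_cons,
        List.append_assoc, List.singleton_append]

theorem helper_alt_eq_cart (words : List String) (wm : List (String × List String)) :
    helper_alt words wm = cart wm words := by
  unfold helper_alt
  rw [alt_aux]
  simp

theorem helper_eq_cart (words : List String) (wm : List (String × List String)) :
    helper words wm = cart wm words := by
  induction words using helper.induct wm with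
  | case1 => rw [helper]; simp [cart]
  | case2 x hne lv hl =>
      simp only [lv] at hl
      rcases x with _ | ⟨w, _ | ⟨y, t⟩⟩
      · exact absurd rfl hne
      · rw [helper]
        simp [cart]
        induction meaningsOf wm w <;> simp_all
      · exfalso
        simp only [List.length_cons, Nat.cast_add, Nat.cast_one] at hl
        omega
  | case3 x hne lv mv hl ihR ihL =>
      simp only [lv, mv] at hl ihR ihL
      have hx : 0 < x.length := by rcases x with _ | _ <;> simp_all
      have hl' : x.length ≠ 1 := by
        intro h; exact hl (by exact_mod_cast h)
      have hlen : 1 < x.length := by omega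
      have hfd : PySem.Int.floordiv ((x.length : Int)) 2 = ((x.length / 2 : Nat) : Int) := by
        exact_mod_cast PySem.Int.floordiv_natCast x.length 2
      have hm : x.length / 2 < x.length := by omega
      have hsl : PySem.List.slice x none (some ((x.length / 2 : Nat) : Int)) = x.take (x.length / 2) := by
        rw [PySem.List.slice_to x (by positivity)]
        norm_cast
      have hcast : ((x.length / 2 : Nat) : Int) + 1 = ((x.length / 2 + 1 : Nat) : Int) := by
        push_cast; ring
      have hsr : PySem.List.slice x (some (((x.length / 2 : Nat) : Int) + 1)) = x.drop (x.length / 2 + 1) := by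
        rw [hcast, PySem.List.slice_from x (by positivity)]
        norm_cast
      rw [hfd] at ihR ihL
      rw [hsl] at ihL
      rw [hsr] at ihR
      have hw : x = x.take (x.length / 2) ++ [x[x.length / 2]] ++ x.drop (x.length / 2 + 1) := by
        rw [List.append_assoc, List.singleton_append, List.getElem_cons_drop,
          List.take_append_drop]
      have hget : PySem.List.pyGetD x ((x.length / 2 : Nat) : Int) "" = x[x.length / 2] := by
        rw [PySem.List.pyGetD_natCast, List.getD_eq_getElem x "" hm]
      conv_rhs => rw [hw]
      rw [cart_append, cart_append]
      rw [helper]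
      simp only [if_neg hne, hfd, hsl, hsr, ihL, ihR, hget,
        if_neg (show ¬((x.length : Int)) = 1 from fun h => hl' (by exact_mod_cast h))]
      simp only [PySem.List.foldl_append_singleton_eq_map, PySem.List.foldl_append_eq_flatMap,
        List.nil_append, cart, List.flatMap_assoc, List.map_flatMap, List.flatMap_map,
        List.map_map, Function.comp_def, List.append_assoc, List.singleton_append]
      simp [List.flatMap_cons]

-- ===== VERDICT (by name: the statement is the Claim_ definition above) =====
theorem helper_spec : Claim_equal_helper := by
  intro words wm _
  unfold Spec_helper
  rw [helper_eq_cart, helper_alt_eq_cart]
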